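-- pv_equiv track=rewrite | github.com/Bartaten/Testing | app/utils/merge.py | _compose_key
-- ===== SOURCE A (Python) =====
-- from typing import Any, Dict, Iterable, List, Optional, Sequence, Tuple
--
-- def _compose_key(rec: Dict[str, Any], keys: Sequence[str]) -> Optional[Tuple[str, ...]]:
--     values: List[str] = []
--     for k in keys:
--         v = rec.get(k)
--         if v is None:
--             return None
--         s = str(v).strip()
--         if s == "":
--             return None
--         values.append(s)
--     return tuple(values)
-- ===== SOURCE B (Python) =====
-- def _compose_key(rec, keys):
--     # Build a filtered index over the record once: key -> stripped non-empty string.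
--     cleaned = {}
--     for k, v in rec.items():
--         if v is not None:
--             s = str(v).strip()
--             if s != "":
--                 cleaned[k] = s
--     # Validity is now just membership: a missing key raises KeyError.
--     try:
--         return tuple(cleaned[k] for k in keys)
--     except KeyError:
--         return None
-- ===== Notes on version B (the rewrite author's own statement) =====
-- stated objective: alternative
-- what changed: Instead of scanning the requested keys with inline per-key validation and early return, B traverses the record once to build a filtered index (key -> stripped non-empty value) and then answers by plain lookups, with a KeyError standing for any invalid key.
import Mathlib
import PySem

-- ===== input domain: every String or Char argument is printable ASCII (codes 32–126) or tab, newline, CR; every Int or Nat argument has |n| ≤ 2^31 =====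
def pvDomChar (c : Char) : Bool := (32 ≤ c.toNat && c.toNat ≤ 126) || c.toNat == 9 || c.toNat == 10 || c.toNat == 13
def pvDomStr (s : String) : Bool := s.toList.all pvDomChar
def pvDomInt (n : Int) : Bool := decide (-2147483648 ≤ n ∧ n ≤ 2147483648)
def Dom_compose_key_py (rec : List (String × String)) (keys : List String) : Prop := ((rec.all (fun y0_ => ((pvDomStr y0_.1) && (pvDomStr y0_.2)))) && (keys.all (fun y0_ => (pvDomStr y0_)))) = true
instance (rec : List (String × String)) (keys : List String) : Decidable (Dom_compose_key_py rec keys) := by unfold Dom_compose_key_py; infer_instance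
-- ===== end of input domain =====

-- B replaces A's validate-as-you-scan pass over the keys by building a filtered index over the record
-- once and then answering by plain lookups: an alternative algorithm of the same cost.
-- ===== PORT A =====
-- A's loop: for each key look up in the record, bail on missing/empty-after-strip, else append.
def composeKeyGoA (rec : List (String × String)) : List String → List String → Option (List String)
  | [], values => some values
  | k :: ks, values =>
    match (PySem.Dict.mk rec).get? k with
    | none => none
    | some v =>
      let s := PySem.Str.strip v
      if s = "" then none else composeKeyGoA rec ks (values ++ [s])

def compose_key_py (rec : List (String × String)) (keys : List String) : Option (List String) :=
  composeKeyGoA rec keys []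

-- ===== PORT B =====
-- Source B's first loop: over rec.items(), keep only the non-None, non-empty-after-strip values.
def composeBuildCleaned : List (String × String) → PySem.Dict String String → PySem.Dict String String
  | [], d => d
  | (k, v) :: rest, d =>
    let s := PySem.Str.strip v
    if s = "" then composeBuildCleaned rest d
    else composeBuildCleaned rest (d.insert k s)

-- Source B's tuple(cleaned[k] for k in keys) with KeyError → None: sequence of lookups, none on a miss.
def composeLookupAll (cleaned : PySem.Dict String String) : List String → Option (List String)
  | [] => some []
  | k :: ks =>
    match cleaned.get? k with
    | none => none
    | some s => (composeLookupAll cleaned ks).map (s :: ·)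

def compose_key_py_alt (rec : List (String × String)) (keys : List String) : Option (List String) :=
  let cleaned := composeBuildCleaned (PySem.Dict.mk rec).items PySem.Dict.empty
  composeLookupAll cleaned keys

-- ===== PRECONDITION & SPEC =====
-- Pre_ excludes association lists whose keys repeat: a Python dict has unique keys, so such lists
-- represent no Python input, and on them A's first-match lookup vs B's rebuilt index are both accidental.
def Pre_compose_key_py (rec : List (String × String)) (keys : List String) : Prop :=
  (rec.map Prod.fst).Nodup
instance (rec : List (String × String)) (keys : List String) : Decidable (Pre_compose_key_py rec keys) := by unfold Pre_compose_key_py; infer_instance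
def pvWitness_compose_key_py : (List (String × String)) × List String := ([("a", " 1 "), ("b", "x")], ["b", "a"])

def Spec_compose_key_py (rec : List (String × String)) (keys : List String) (out : Option (List String)) : Prop := out = compose_key_py_alt rec keys
instance (rec : List (String × String)) (keys : List String) (out : Option (List String)) : Decidable (Spec_compose_key_py rec keys out) := by unfold Spec_compose_key_py; infer_instance

-- ===== CLAIM (what is proved, stated in full; the proofs are below) =====
def Claim_equal_compose_key_py : Prop := ∀ (rec : List (String × String)) (keys : List String), Dom_compose_key_py rec keys → Pre_compose_key_py rec keys → Spec_compose_key_py rec keys (compose_key_py rec keys)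

-- ===== LEMMAS AND PROOFS =====

-- What a lookup in B's cleaned index returns, in terms of A's first-match lookup in the record.
theorem composeBuildCleaned_get? (rec : List (String × String))
    (d : PySem.Dict String String) (x : String)
    (hnd : (rec.map Prod.fst).Nodup)
    (hd : ∀ y ∈ rec.map Prod.fst, d.get? y = none) :
    (composeBuildCleaned rec d).get? x =
      if x ∈ rec.map Prod.fst then
        ((PySem.Dict.mk rec).get? x).bind
          (fun v => if PySem.Str.strip v = "" then none else some (PySem.Str.strip v))
      else d.get? x := by
  induction rec generalizing d with
  | nil => simp [composeBuildCleaned]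
  | cons p rest ih =>
    obtain ⟨k, v⟩ := p
    simp only [List.map_cons, List.nodup_cons] at hnd
    obtain ⟨hk, hrest⟩ := hnd
    simp only [composeBuildCleaned]
    by_cases hs : PySem.Str.strip v = ""
    · rw [if_pos hs]
      rw [ih d hrest (fun y hy => hd y (by rw [List.map_cons]; exact List.mem_cons_of_mem _ hy))]
      by_cases hx : x ∈ rest.map Prod.fst
      · have hxk : ¬ (k == x) = true := by
          intro h
          have hkx : k = x := eq_of_beq h
          subst hkx
          exact hk hx
        simp [hx, PySem.Dict.get?_mk_cons, hxk]
      · by_cases hxk : x = k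
        · subst hxk
          have hdx : d.get? x = none := hd x (by rw [List.map_cons]; exact List.mem_cons_self ..)
          simp [hx, PySem.Dict.get?_mk_cons, hs, hdx]
        · have hnm : x ∉ (k :: rest.map Prod.fst) := by
            intro h
            rcases List.mem_cons.mp h with h1 | h2
            · exact hxk h1
            · exact hx h2
          have hkx : ¬ (k == x) = true := by
            intro h; exact hxk (eq_of_beq h).symm
          simp [List.map_cons, hnm, hx]
    · rw [if_neg hs]
      have hd' : ∀ y ∈ rest.map Prod.fst, (d.insert k (PySem.Str.strip v)).get? y = none := by
        intro y hy
        have hyk : y ≠ k := by rintro rfl; exact hk hy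
        rw [PySem.Dict.get?_insert_of_ne d (PySem.Str.strip v) hyk]
        exact hd y (by rw [List.map_cons]; exact List.mem_cons_of_mem _ hy)
      rw [ih (d.insert k (PySem.Str.strip v)) hrest hd']
      by_cases hx : x ∈ rest.map Prod.fst
      · have hxk : ¬ (k == x) = true := by
          intro h
          have hkx : k = x := eq_of_beq h
          subst hkx
          exact hk hx
        simp [hx, PySem.Dict.get?_mk_cons, hxk]
      · by_cases hxk : x = k
        · subst hxk
          simp [hx, PySem.Dict.get?_mk_cons, PySem.Dict.get?_insert_self, hs]
        · have hnm : x ∉ (k :: rest.map Prod.fst) := by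
            intro h
            rcases List.mem_cons.mp h with h1 | h2
            · exact hxk h1
            · exact hx h2
          have hkx : ¬ (k == x) = true := by
            intro h; exact hxk (eq_of_beq h).symm
          simp [List.map_cons, hnm, hx,
                PySem.Dict.get?_insert_of_ne d (PySem.Str.strip v) hxk]

-- With unique record keys, a cleaned-index lookup is exactly A's lookup-then-strip-then-test.
theorem cleaned_get?_eq (rec : List (String × String)) (x : String)
    (hnd : (rec.map Prod.fst).Nodup) :
    (composeBuildCleaned (PySem.Dict.mk rec).items PySem.Dict.empty).get? x =
      ((PySem.Dict.mk rec).get? x).bind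
        (fun v => if PySem.Str.strip v = "" then none else some (PySem.Str.strip v)) := by
  have hitems : (PySem.Dict.mk rec).items = rec := rfl
  rw [hitems, composeBuildCleaned_get? rec PySem.Dict.empty x hnd (by intro y _; simp)]
  by_cases hx : x ∈ rec.map Prod.fst
  · simp [hx]
  · have hnone : (PySem.Dict.mk rec).get? x = none := by
      rw [PySem.Dict.get?_eq_none_iff_not_mem_keys]
      simpa [PySem.Dict.keys_mk] using hx
    simp [hx, hnone]

-- A's accumulator loop over the keys equals B's sequence of lookups in the cleaned index.
theorem composeKeyGoA_eq_lookupAll (rec : List (String × String)) (keys : List String)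
    (hnd : (rec.map Prod.fst).Nodup) :
    ∀ values : List String,
      composeKeyGoA rec keys values =
        (composeLookupAll (composeBuildCleaned (PySem.Dict.mk rec).items PySem.Dict.empty) keys).map
          (values ++ ·) := by
  induction keys with
  | nil => intro values; simp [composeKeyGoA, composeLookupAll]
  | cons k ks ih =>
    intro values
    simp only [composeKeyGoA, composeLookupAll, cleaned_get?_eq rec k hnd]
    cases h : (PySem.Dict.mk rec).get? k with
    | none => simp
    | some v =>
      by_cases hs : PySem.Str.strip v = ""
      · simp [hs]
      · simp only [hs, Option.bind_some]
        rw [ih (values ++ [PySem.Str.strip v])]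
        cases composeLookupAll (composeBuildCleaned (PySem.Dict.mk rec).items PySem.Dict.empty) ks with
        | none => simp
        | some t => simp

-- ===== VERDICT (by name: the statement is the Claim_ definition above) =====
theorem compose_key_py_spec : Claim_equal_compose_key_py := by
  intro rec keys _ hpre
  unfold Spec_compose_key_py compose_key_py compose_key_py_alt
  simpa using composeKeyGoA_eq_lookupAll rec keys hpre []
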